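-- pv_equiv track=rewrite | github.com/melissaliliara/Desafios-em-Python | 3.complete.py | sequencia_f
-- ===== SOURCE A (Python) =====
-- def sequencia_f(n):
--     seq = [2, 10, 12, 16, 17, 18, 19]
--     if n <= len(seq):
--         return seq[:n]
--     else:
--         for i in range(len(seq), n):
--             seq.append(seq[-1] + 1)
--     return seq
-- ===== SOURCE B (Python) =====
-- def sequencia_f(n):
--     def term(i):
--         return (2, 10, 12, 16, 17, 18, 19)[i] if i < 7 else i + 13
--     return [term(i) for i in range(n)]
-- ===== Notes on version B (the rewrite author's own statement) =====
-- stated objective: alternative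
-- what changed: Generates the whole list element-wise from a per-index formula term(i) (table lookup for i<7, i+13 otherwise) over range(n), instead of slicing a prefix and running a stateful append-last+1 loop.
-- intended difference: For -6 <= n <= -1 A returns a nonempty prefix via Python's negative-slice wraparound seq[:n], while B returns [], the intended 'first n terms' answer for a non-positive count. — e.g. on sequencia_f(-2): A returns [2, 10, 12, 16, 17], B returns []
import Mathlib
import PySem

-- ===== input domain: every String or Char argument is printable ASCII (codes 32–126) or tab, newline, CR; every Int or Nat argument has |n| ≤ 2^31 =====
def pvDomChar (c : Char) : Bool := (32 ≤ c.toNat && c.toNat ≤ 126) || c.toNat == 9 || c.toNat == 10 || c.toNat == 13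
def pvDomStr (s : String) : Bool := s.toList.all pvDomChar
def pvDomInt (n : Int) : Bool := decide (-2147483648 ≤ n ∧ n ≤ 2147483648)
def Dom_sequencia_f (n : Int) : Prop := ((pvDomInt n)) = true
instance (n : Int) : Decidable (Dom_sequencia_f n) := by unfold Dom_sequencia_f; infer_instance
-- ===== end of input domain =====

-- ===== PORT A =====
-- header: B builds the list element-wise from a per-index formula instead of A's slice + stateful
-- append-last+1 loop; B returns [] for negative n where A's negative slice wraps (see D_).
def sequencia_f (n : Int) : List Int :=
  let seq : List Int := [2, 10, 12, 16, 17, 18, 19]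
  if n ≤ PySem.List.len seq then
    PySem.List.slice seq none (some n)
  else
    (PySem.List.pyRange (PySem.List.len seq) n 1).foldl
      (fun s _ => s ++ [PySem.List.pyGetD s (-1) 0 + 1]) seq

-- ===== PORT B =====
-- term(i): tuple lookup for i < 7 (always in range when reached, so getD 0 is exact), else i + 13
def seqTerm (i : Int) : Int :=
  if i < 7 then (PySem.List.pyGet? ([2, 10, 12, 16, 17, 18, 19] : List Int) i).getD 0
  else i + 13

def sequencia_f_alt (n : Int) : List Int :=
  (PySem.List.pyRange 0 n 1).map seqTerm

-- ===== PRECONDITION & SPEC =====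
-- For -6 <= n <= -1 A returns a nonempty prefix via Python's negative-slice wraparound seq[:n],
-- while B returns [], the intended 'first n terms' answer for a non-positive count.
def D_sequencia_f (n : Int) : Prop := -6 ≤ n ∧ n ≤ -1
instance (n : Int) : Decidable (D_sequencia_f n) := by unfold D_sequencia_f; infer_instance

def Spec_sequencia_f (n : Int) (out : List Int) : Prop := ¬ D_sequencia_f n → out = sequencia_f_alt n
instance (n : Int) (out : List Int) : Decidable (Spec_sequencia_f n out) := by unfold Spec_sequencia_f; infer_instance

def pvDiffWitness_sequencia_f : Int := -2
def pvDiffWitnessOut_sequencia_f : (List Int) × (List Int) := ([2, 10, 12, 16, 17], [])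

-- ===== CLAIM (what is proved, stated in full; the proofs are below) =====
def Claim_unchanged_sequencia_f : Prop := ∀ (n : Int), Dom_sequencia_f n → Spec_sequencia_f n (sequencia_f n)
def Claim_changed_sequencia_f : Prop := Dom_sequencia_f (pvDiffWitness_sequencia_f) ∧ D_sequencia_f (pvDiffWitness_sequencia_f) ∧ sequencia_f (pvDiffWitness_sequencia_f) = pvDiffWitnessOut_sequencia_f.1 ∧ sequencia_f_alt (pvDiffWitness_sequencia_f) = pvDiffWitnessOut_sequencia_f.2 ∧ pvDiffWitnessOut_sequencia_f.1 ≠ pvDiffWitnessOut_sequencia_f.2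
def Claim_exact_sequencia_f : Prop := ∀ (n : Int), Dom_sequencia_f n → D_sequencia_f n → sequencia_f n ≠ sequencia_f_alt n

-- ===== LEMMAS AND PROOFS =====

-- loop invariant: folding the append-last+1 step over range(a, a+k) onto a list ending in a+12
-- produces exactly the tail (a+12+1, …) given by the per-index formula i+13
lemma seq_loop (k : Nat) : ∀ (a : Int) (s : List Int),
    (PySem.List.pyRange a (a + k) 1).foldl
      (fun t _ => t ++ [PySem.List.pyGetD t (-1) 0 + 1]) (s ++ [a + 12])
    = s ++ [a + 12] ++ (PySem.List.pyRange a (a + k) 1).map (fun i => i + 13) := by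
  induction k with
  | zero => intro a s; simp [PySem.List.pyRange_one_eq_nil]
  | succ k ih =>
    intro a s
    have hlt : a < a + (k + 1 : Nat) := by push_cast; omega
    rw [PySem.List.pyRange_one_cons hlt]
    simp only [List.foldl_cons, List.map_cons]
    rw [PySem.List.pyGetD_neg_one_append_singleton]
    have he : a + (k + 1 : Nat) = (a + 1) + (k : Nat) := by push_cast; ring
    have h13 : a + 12 + 1 = (a + 1) + 12 := by ring
    rw [he, h13, ih (a + 1) (s ++ [a + 12])]
    simp [List.append_assoc]
    ring_nf

-- seqTerm agrees with i + 13 on the tail indices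
lemma seqTerm_of_ge (i : Int) (h : 7 ≤ i) : seqTerm i = i + 13 := by
  unfold seqTerm; rw [if_neg (by omega)]

-- B on the prefix indices is exactly the prefix list
lemma map_seqTerm_prefix : (PySem.List.pyRange 0 7 1).map seqTerm = [2, 10, 12, 16, 17, 18, 19] := by
  decide

theorem sequencia_f_spec : Claim_unchanged_sequencia_f := by
  intro n _ hD
  unfold D_sequencia_f at hD
  unfold sequencia_f sequencia_f_alt
  have hlen : ((([2, 10, 12, 16, 17, 18, 19] : List Int)).length : Int) = 7 := by norm_num
  simp only [PySem.List.len_eq, hlen]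
  by_cases h : n ≤ 7
  · rw [if_pos h]
    by_cases hn0 : n ≤ 0
    · -- n = 0 or n ≤ -7 (since -6..-1 is excluded by ¬D_): both sides empty
      have hB : PySem.List.pyRange 0 n 1 = [] := PySem.List.pyRange_one_eq_nil (by omega)
      rw [hB, List.map_nil]
      rcases eq_or_lt_of_le hn0 with he | hlt0
      · subst he; decide
      · have hle7 : n ≤ -7 := by omega
        obtain ⟨k, hk⟩ : ∃ k : Nat, n = -(k : Int) := ⟨(-n).toNat, by omega⟩
        subst hk
        rw [PySem.List.slice_to_neg_natCast _ _ (by omega)]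
        have : ([2, 10, 12, 16, 17, 18, 19] : List Int).length - k = 0 := by
          simp; omega
        rw [this, List.take_zero]
    · -- 1 ≤ n ≤ 7: finitely many cases
      obtain ⟨k, hk⟩ : ∃ k : Nat, n = (k : Int) := ⟨n.toNat, by omega⟩
      subst hk
      have hk1 : 1 ≤ k := by omega
      have hk7 : k ≤ 7 := by exact_mod_cast h
      interval_cases k <;> decide
  · -- n > 7: split B's range at 7 and use the loop invariant on A
    rw [if_neg h]
    have h7n : (7 : Int) ≤ n := by omega
    rw [PySem.List.pyRange_one_append 0 7 n (by omega) h7n, List.map_append,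
        map_seqTerm_prefix]
    have htail : (PySem.List.pyRange 7 n 1).map seqTerm
        = (PySem.List.pyRange 7 n 1).map (fun i => i + 13) := by
      refine List.map_congr_left ?_
      intro i hi
      rw [PySem.List.mem_pyRange_one] at hi
      exact seqTerm_of_ge i hi.1
    rw [htail]
    obtain ⟨k, hk⟩ : ∃ k : Nat, n = 7 + (k : Int) := ⟨(n - 7).toNat, by omega⟩
    subst hk
    have := seq_loop k 7 [2, 10, 12, 16, 17, 18]
    norm_num at this ⊢
    exact this

theorem sequencia_f_changed : Claim_changed_sequencia_f := by
  unfold Claim_changed_sequencia_f; decide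

theorem sequencia_f_tight : Claim_exact_sequencia_f := by
  intro n _ hD
  unfold D_sequencia_f at hD
  obtain ⟨h1, h2⟩ := hD
  have hB : sequencia_f_alt n = [] := by
    unfold sequencia_f_alt
    rw [PySem.List.pyRange_one_eq_nil (by omega), List.map_nil]
  rw [hB]
  obtain ⟨k, hk⟩ : ∃ k : Nat, n = -(k : Int) := ⟨(-n).toNat, by omega⟩
  subst hk
  unfold sequencia_f
  have hle : -(k : Int) ≤ PySem.List.len ([2, 10, 12, 16, 17, 18, 19] : List Int) := by
    simp [PySem.List.len_eq]
  rw [if_pos hle, PySem.List.slice_to_neg_natCast _ _ (by omega)]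
  have hk6 : k ≤ 6 := by omega
  intro hcon
  have := congrArg List.length hcon
  simp at this
  omega
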